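-- pv_equiv track=rewrite | github.com/majowyporanek/python_2023 | Zadanie_4/4.5.py | odwracanie
-- ===== SOURCE A (Python) =====
-- def odwracanie(L, left, right):
--     if left < 0 or right >= len(L) or left >= right:
--         raise ValueError("Niepoprawne indeksy")
--
--     while left < right:
--         L[left], L[right] = L[right], L[left]
--         left += 1
--         right -= 1
--
--     return L
-- ===== SOURCE B (Python) =====
-- def odwracanie(L, left, right):
--     if left < 0 or right >= len(L) or left >= right:
--         raise ValueError("Niepoprawne indeksy")
--
--     L[left:right+1] = L[left:right+1][::-1]
--     return L
-- ===== Notes on version B (the rewrite author's own statement) =====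
-- stated objective: idiomatic
-- what changed: The explicit two-pointer swap loop is replaced by a single in-place slice-reversal assignment L[left:right+1] = L[left:right+1][::-1].
import Mathlib
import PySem

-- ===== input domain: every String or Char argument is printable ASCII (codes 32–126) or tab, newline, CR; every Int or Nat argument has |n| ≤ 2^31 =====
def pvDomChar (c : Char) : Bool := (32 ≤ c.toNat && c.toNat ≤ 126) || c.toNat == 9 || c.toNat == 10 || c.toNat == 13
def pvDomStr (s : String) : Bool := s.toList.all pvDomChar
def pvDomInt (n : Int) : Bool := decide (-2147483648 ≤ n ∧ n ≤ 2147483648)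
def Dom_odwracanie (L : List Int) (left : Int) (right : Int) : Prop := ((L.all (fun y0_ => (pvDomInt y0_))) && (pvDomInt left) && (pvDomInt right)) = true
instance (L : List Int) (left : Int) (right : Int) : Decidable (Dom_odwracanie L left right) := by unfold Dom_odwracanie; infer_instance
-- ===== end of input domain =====

-- ===== PORT A =====
-- B replaces A's two-pointer swap loop with one slice-reversal assignment; equivalence is
-- about the RETURN value only (both Pythons also mutate L in place identically).
-- the while loop of A: swap L[l] and L[r], move the pointers inward
def odwLoop (L : List Int) (l r : Int) : List Int :=
  if l < r then
    let vl := ((PySem.List.pyGet? L l).getD 0)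
    let vr := ((PySem.List.pyGet? L r).getD 0)
    odwLoop ((L.set l.toNat vr).set r.toNat vl) (l + 1) (r - 1)
  else L
termination_by (r - l).toNat
decreasing_by omega

def odwracanie (L : List Int) (left : Int) (right : Int) : List Int :=
  if left < 0 ∨ right ≥ (L.length : Int) ∨ left ≥ right then []  -- raise ValueError (excluded by Pre_)
  else odwLoop L left right

-- ===== PORT B =====
def odwracanie_alt (L : List Int) (left : Int) (right : Int) : List Int :=
  if left < 0 ∨ right ≥ (L.length : Int) ∨ left ≥ right then []  -- raise ValueError (excluded by Pre_)
  else
    -- L[left:right+1] = L[left:right+1][::-1]; return L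
    PySem.List.slice L none (some left)
      ++ (PySem.List.slice L (some left) (some (right + 1))).reverse
      ++ PySem.List.slice L (some (right + 1)) none

-- ===== PRECONDITION & SPEC =====
-- exactly the inputs on which A returns (otherwise it raises ValueError)
def Pre_odwracanie (L : List Int) (left : Int) (right : Int) : Prop :=
  0 ≤ left ∧ left < right ∧ right < (L.length : Int)
instance (L : List Int) (left : Int) (right : Int) : Decidable (Pre_odwracanie L left right) := by unfold Pre_odwracanie; infer_instance
def pvWitness_odwracanie : List Int × Int × Int := ([1, 2, 3, 4], 0, 3)

def Spec_odwracanie (L : List Int) (left : Int) (right : Int) (out : List Int) : Prop := out = odwracanie_alt L left right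
instance (L : List Int) (left : Int) (right : Int) (out : List Int) : Decidable (Spec_odwracanie L left right out) := by unfold Spec_odwracanie; infer_instance

-- ===== CLAIM (what is proved, stated in full; the proofs are below) =====
def Claim_equal_odwracanie : Prop := ∀ (L : List Int) (left : Int) (right : Int), Dom_odwracanie L left right → Pre_odwracanie L left right → Spec_odwracanie L left right (odwracanie L left right)

-- ===== LEMMAS AND PROOFS =====

-- the swap loop realises take/reverse-of-middle/drop
theorem odwLoop_eq (n : Nat) (L : List Int) (l r : Int)
    (hn : (r - l).toNat ≤ n) (hl : 0 ≤ l) (hlr : l ≤ r + 1) (hr : r < (L.length : Int)) :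
    odwLoop L l r =
      L.take l.toNat ++ ((L.drop l.toNat).take ((r + 1 - l).toNat)).reverse
        ++ L.drop ((r + 1).toNat) := by
  induction n generalizing L l r with
  | zero =>
    have hge : ¬ l < r := by omega
    rw [odwLoop]
    simp only [if_neg hge]
    rcases (by omega : l = r ∨ l = r + 1) with h | h
    · subst h
      have hlen : l.toNat < L.length := by omega
      rw [show (l + 1 - l).toNat = 1 from by omega, show (l + 1).toNat = l.toNat + 1 from by omega]
      rw [List.drop_eq_getElem_cons hlen]
      simp only [List.take_succ_cons, List.take_zero, List.reverse_singleton]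
      rw [List.append_assoc, List.singleton_append, ← List.drop_eq_getElem_cons hlen,
          List.take_append_drop]
    · subst h
      rw [show (r + 1 - (r + 1)).toNat = 0 from by omega]
      simp
  | succ n ih =>
    rw [odwLoop]
    by_cases hlt : l < r
    · have ha : l.toNat < L.length := by omega
      have hb : r.toNat < L.length := by omega
      set a := l.toNat with hadef
      set b := r.toNat with hbdef
      have hab : a < b := by omega
      have hgl : (PySem.List.pyGet? L l).getD 0 = L[a] := by
        rw [PySem.List.pyGet?_eq_some_getElem L hl (by omega)]; rfl
      have hgr : (PySem.List.pyGet? L r).getD 0 = L[b] := by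
        rw [PySem.List.pyGet?_eq_some_getElem L (by omega) (by omega)]; rfl
      simp only [if_pos hlt, hgl, hgr]
      set S : List Int := (L.set a L[b]).set b L[a] with hS
      have hSlen : S.length = L.length := by simp [hS]
      have hSget : ∀ (i : Nat) (h : i < S.length),
          S[i]'h = if i = a then L[b] else if i = b then L[a] else L[i]'(by omega) := by
        intro i h
        simp only [hS, List.getElem_set]
        split_ifs <;> first | rfl | omega
      have hrec := ih S (l + 1) (r - 1) (by omega) (by omega) (by omega) (by rw [hSlen]; omega)
      rw [show (l + 1).toNat = a + 1 from by omega, show (r - 1 + 1).toNat = b from by omega,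
          show (r - 1 + 1 - (l + 1)).toNat = b - (a + 1) from by omega] at hrec
      rw [hrec]
      rw [show (r + 1 - l).toNat = b + 1 - a from by omega,
          show (r + 1).toNat = b + 1 from by omega]
      have F1 : S.take (a + 1) = L.take a ++ [L[b]'hb] := by
        apply List.ext_getElem (by simp [hSlen]; omega)
        intro i h1 h2
        rw [List.getElem_take, hSget i (by simp [hSlen] at h1 ⊢; omega)]
        rcases Nat.lt_or_ge i a with hc | hc
        · rw [List.getElem_append_left (by simp; omega), List.getElem_take]
          rw [if_neg (by omega), if_neg (by omega)]
        · have hia : i = a := by simp [hSlen] at h1; omega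
          subst hia
          rw [if_pos rfl, List.getElem_append_right (by simp)]
          simp
      have F2' : S.drop (b + 1) = L.drop (b + 1) := by
        apply List.ext_getElem (by simp [hSlen])
        intro i h1 h2
        rw [List.getElem_drop, List.getElem_drop, hSget _ (by simp [hSlen] at h1 ⊢; omega)]
        rw [if_neg (by omega), if_neg (by omega)]
      have hbS : b < S.length := by omega
      have F2 : S.drop b = L[a]'ha :: L.drop (b + 1) := by
        rw [List.drop_eq_getElem_cons hbS, F2', hSget b hbS,
            if_neg (by omega), if_pos rfl]
      have F3 : (S.drop (a + 1)).take (b - (a + 1)) = (L.drop (a + 1)).take (b - (a + 1)) := by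
        apply List.ext_getElem (by simp [hSlen])
        intro i h1 h2
        rw [List.getElem_take, List.getElem_take, List.getElem_drop, List.getElem_drop,
            hSget _ (by simp [hSlen] at h1 ⊢; omega)]
        have hi : i < b - (a + 1) := by simp [hSlen] at h1; omega
        rw [if_neg (by omega), if_neg (by omega)]
      have F4 : (L.drop a).take (b + 1 - a)
          = L[a]'ha :: ((L.drop (a + 1)).take (b - (a + 1)) ++ [L[b]'hb]) := by
        rw [List.drop_eq_getElem_cons ha, show b + 1 - a = (b - a) + 1 from by omega,
            List.take_succ_cons]
        congr 1
        rw [show b - a = (b - (a + 1)) + 1 from by omega, List.take_add_one]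
        congr 1
        rw [List.getElem?_drop, show a + 1 + (b - (a + 1)) = b from by omega,
            List.getElem?_eq_getElem hb]
        rfl
      rw [F1, F2, F3, F4]
      simp [List.reverse_append, List.append_assoc]
    · -- loop stops; same argument as the fuel-0 case
      simp only [if_neg hlt]
      rcases (by omega : l = r ∨ l = r + 1) with h | h
      · subst h
        have hlen : l.toNat < L.length := by omega
        rw [show (l + 1 - l).toNat = 1 from by omega, show (l + 1).toNat = l.toNat + 1 from by omega]
        rw [List.drop_eq_getElem_cons hlen]
        simp only [List.take_succ_cons, List.take_zero, List.reverse_singleton]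
        rw [List.append_assoc, List.singleton_append, ← List.drop_eq_getElem_cons hlen,
            List.take_append_drop]
      · subst h
        rw [show (r + 1 - (r + 1)).toNat = 0 from by omega]
        simp

-- ===== VERDICT (by name: the statement is the Claim_ definition above) =====
theorem odwracanie_spec : Claim_equal_odwracanie := by
  intro L left right _ hpre
  obtain ⟨h0, hlr, hr⟩ := hpre
  unfold Spec_odwracanie odwracanie odwracanie_alt
  have hcond : ¬ (left < 0 ∨ right ≥ (L.length : Int) ∨ left ≥ right) := by omega
  rw [if_neg hcond, if_neg hcond]
  rw [odwLoop_eq (right - left).toNat L left right le_rfl h0 (by omega) hr]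
  rw [PySem.List.slice_to L h0, PySem.List.slice_from L (by omega : (0:Int) ≤ right + 1),
      PySem.List.slice_of_nonneg L h0 (by omega) (by omega) (by omega),
      show (right + 1).toNat - left.toNat = (right + 1 - left).toNat from by omega]
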